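-- pv_equiv track=rewrite | github.com/markhuberty/twitter_election2012 | code/sentiment/score_tweet_sentiment.py | oconnor_score
-- ===== SOURCE A (Python) =====
-- def oconnor_score(tweet, sentiment_dict):
--     tweet_words = tweet.lower().split(' ')
--     pos_count = 0
--     neg_count = 0
--     for word in tweet_words:
--         if word in sentiment_dict:
--             if sentiment_dict[word] < 0:
--                 neg_count += 1
--             else:
--                 pos_count += 1
--
--     return pos_count, neg_count
-- ===== SOURCE B (Python) =====
-- def oconnor_score(tweet, sentiment_dict):
--     freq = {}
--     for w in tweet.lower().split(' '):
--         freq[w] = freq.get(w, 0) + 1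
--     total = 0
--     neg = 0
--     for w, c in freq.items():
--         s = sentiment_dict.get(w)
--         if s is not None:
--             total += c
--             if s < 0:
--                 neg += c
--     return total - neg, neg
-- ===== Notes on version B (the rewrite author's own statement) =====
-- stated objective: alternative
-- what changed: B first aggregates the tweet into a word-frequency dict, then does one dictionary lookup per DISTINCT word, summing frequencies of matched words and of negatively-scored words, and returns positives by subtraction; A looks up every word occurrence and increments two in-branch counters.
import Mathlib
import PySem

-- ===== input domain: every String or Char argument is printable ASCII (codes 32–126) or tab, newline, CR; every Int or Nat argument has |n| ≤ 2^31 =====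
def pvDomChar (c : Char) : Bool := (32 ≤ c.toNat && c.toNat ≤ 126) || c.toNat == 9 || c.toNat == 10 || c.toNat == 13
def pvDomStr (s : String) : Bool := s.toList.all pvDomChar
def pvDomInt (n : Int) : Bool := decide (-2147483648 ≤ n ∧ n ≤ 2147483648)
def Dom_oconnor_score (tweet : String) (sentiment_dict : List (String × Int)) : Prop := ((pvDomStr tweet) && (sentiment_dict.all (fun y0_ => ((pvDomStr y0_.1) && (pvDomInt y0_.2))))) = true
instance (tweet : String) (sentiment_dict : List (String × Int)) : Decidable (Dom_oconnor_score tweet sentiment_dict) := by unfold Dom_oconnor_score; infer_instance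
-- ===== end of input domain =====

-- B aggregates the tweet into a word-frequency dict first and does one sentiment lookup per
-- DISTINCT word (positives derived by subtraction), instead of A's per-occurrence two-counter
-- loop (objective: alternative).

-- ===== PORT A =====
-- the loop body: 'if word in sentiment_dict: if sentiment_dict[word] < 0: neg += 1 else: pos += 1'
-- (the index d[word] is ported as getD word 0, exact here because it only runs under 'contains')
def oconnor_score (tweet : String) (sentiment_dict : List (String × Int)) : Int × Int :=
  ((PySem.Str.split? (PySem.Str.lower tweet) " ").getD []).foldl (fun pn word =>
    if (PySem.Dict.mk sentiment_dict).contains word then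
      if (PySem.Dict.mk sentiment_dict).getD word 0 < 0 then (pn.1, pn.2 + 1) else (pn.1 + 1, pn.2)
    else pn) (0, 0)

-- ===== PORT B =====
-- 'freq[w] = freq.get(w, 0) + 1' is d.insert w (d.getD w 0 + 1); the second loop walks freq.items()
-- and 'sentiment_dict.get(w)' is the Option-returning get?
def oconnor_score_alt (tweet : String) (sentiment_dict : List (String × Int)) : Int × Int :=
  let freq := ((PySem.Str.split? (PySem.Str.lower tweet) " ").getD []).foldl
    (fun d w => d.insert w (d.getD w 0 + 1)) PySem.Dict.empty
  let tn := freq.items.foldl (fun acc p =>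
    match (PySem.Dict.mk sentiment_dict).get? p.1 with
    | none => acc
    | some s => (acc.1 + p.2, if s < 0 then acc.2 + p.2 else acc.2)) ((0 : Int), (0 : Int))
  (tn.1 - tn.2, tn.2)

-- ===== PRECONDITION & SPEC =====
def Spec_oconnor_score (tweet : String) (sentiment_dict : List (String × Int)) (out : Int × Int) : Prop := out = oconnor_score_alt tweet sentiment_dict
instance (tweet : String) (sentiment_dict : List (String × Int)) (out : Int × Int) : Decidable (Spec_oconnor_score tweet sentiment_dict out) := by unfold Spec_oconnor_score; infer_instance

-- ===== CLAIM (what is proved, stated in full; the proofs are below) =====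
def Claim_equal_oconnor_score : Prop := ∀ (tweet : String) (sentiment_dict : List (String × Int)), Dom_oconnor_score tweet sentiment_dict → Spec_oconnor_score tweet sentiment_dict (oconnor_score tweet sentiment_dict)

-- ===== LEMMAS AND PROOFS =====

-- sum of an if-guarded map is the sum over the filtered list
theorem sum_map_if_eq_sum_filter (l : List String) (p : String → Bool) (f : String → Int) :
    (l.map fun k => if p k then f k else 0).sum = ((l.filter p).map f).sum := by
  induction l with
  | nil => rfl
  | cons x t ih =>
    by_cases hx : p x <;> simp [hx, ih]

-- summing the multiplicities of the distinct words that satisfy q counts the occurrences satisfying q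
theorem sum_count_set (ws : List String) (q : String → Bool) :
    (((PySem.Set.ofList ws).filter q).map fun x => ((ws.count x : Nat) : Int)).sum
      = ((ws.countP q : Nat) : Int) := by
  have hperm : ((PySem.Set.ofList ws).filter q).Perm ((ws.dedup).filter q) := by
    rw [List.perm_ext_iff_of_nodup ((PySem.Set.nodup_ofList ws).filter q)
      (ws.nodup_dedup.filter q)]
    intro a
    simp [List.mem_filter, PySem.Set.mem_ofList, List.mem_dedup]
  rw [(hperm.map _).sum_eq,
    show (fun x => ((ws.count x : Nat) : Int))
        = (fun n : Nat => (n : Int)) ∘ (fun x => ws.count x) from rfl,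
    ← List.map_map, ← Nat.cast_list_sum, List.sum_map_count_dedup_filter_eq_countP]

-- counting occurrences that are in the dict splits into the non-negative and the negative ones
theorem countP_split (l : List String) (c n : String → Bool) :
    l.countP c = l.countP (fun w => c w && !n w) + l.countP (fun w => c w && n w) := by
  induction l with
  | nil => rfl
  | cons x t ih =>
    by_cases hc : c x <;> by_cases hn : n x <;>
      simp [hc, hn, ih] <;> omega

-- A's loop computes the two occurrence counts directly
theorem A_loop (d : PySem.Dict String Int) (ws : List String) :
    ws.foldl (fun pn word =>
      if d.contains word then
        if d.getD word 0 < 0 then (pn.1, pn.2 + 1) else (pn.1 + 1, pn.2)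
      else pn) ((0 : Int), (0 : Int))
    = (((ws.countP fun w => d.contains w && !(decide (d.getD w 0 < 0)) : Nat) : Int),
       ((ws.countP fun w => d.contains w && decide (d.getD w 0 < 0) : Nat) : Int)) := by
  have h1 := PySem.List.foldl_congr_mem (l := ws) (init := ((0 : Int), (0 : Int)))
    (f := fun pn word =>
      if d.contains word then
        if d.getD word 0 < 0 then (pn.1, pn.2 + 1) else (pn.1 + 1, pn.2)
      else pn)
    (g := fun pn w =>
      ((if d.contains w && !(decide (d.getD w 0 < 0)) then pn.1 + 1 else pn.1),
       (if d.contains w && decide (d.getD w 0 < 0) then pn.2 + 1 else pn.2)))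
    (by intro acc x _
        by_cases hc : d.contains x <;> by_cases hl : d.getD x 0 < 0 <;> simp [hc, hl])
  rw [h1,
    PySem.List.foldl_prod_mk
      (f := fun a w => if d.contains w && !(decide (d.getD w 0 < 0)) then a + 1 else a)
      (g := fun a w => if d.contains w && decide (d.getD w 0 < 0) then a + 1 else a),
    PySem.List.foldl_if_add_one, PySem.List.foldl_if_add_one]
  simp

-- B's loop over the frequency dict's items computes (#in-dict occurrences, #negative occurrences)
theorem B_loop (d : PySem.Dict String Int) (ws : List String) :
    (PySem.Dict.counter ws).items.foldl (fun acc p =>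
      match d.get? p.1 with
      | none => acc
      | some s => (acc.1 + p.2, if s < 0 then acc.2 + p.2 else acc.2)) ((0 : Int), (0 : Int))
    = (((ws.countP fun w => d.contains w : Nat) : Int),
       ((ws.countP fun w => d.contains w && decide (d.getD w 0 < 0) : Nat) : Int)) := by
  rw [PySem.Dict.items_counter, List.foldl_map]
  have h1 := PySem.List.foldl_congr_mem (l := PySem.Set.ofList ws) (init := ((0 : Int), (0 : Int)))
    (f := fun acc k =>
      match d.get? (k, ((ws.count k : Nat) : Int)).1 with
      | none => acc
      | some s => (acc.1 + (k, ((ws.count k : Nat) : Int)).2,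
                   if s < 0 then acc.2 + (k, ((ws.count k : Nat) : Int)).2 else acc.2))
    (g := fun acc k =>
      ((acc.1 + (if d.contains k then ((ws.count k : Nat) : Int) else 0)),
       (acc.2 + (if d.contains k && decide (d.getD k 0 < 0) then ((ws.count k : Nat) : Int) else 0))))
    (by intro acc k _
        rcases hv : d.get? k with _ | s
        · have hc : d.contains k = false := by rw [PySem.Dict.contains_eq_isSome_get?, hv]; rfl
          simp [hc, hv]
        · have hc : d.contains k = true := by rw [PySem.Dict.contains_eq_isSome_get?, hv]; rfl
          have hgd : d.getD k 0 = s := PySem.Dict.getD_of_get?_eq_some d 0 hv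
          by_cases hl : s < 0 <;> simp [hc, hgd, hl, hv])
  rw [h1,
    PySem.List.foldl_prod_mk
      (f := fun a k => a + (if d.contains k then ((ws.count k : Nat) : Int) else 0))
      (g := fun a k => a + (if d.contains k && decide (d.getD k 0 < 0) then ((ws.count k : Nat) : Int) else 0)),
    PySem.List.foldl_add, PySem.List.foldl_add,
    sum_map_if_eq_sum_filter, sum_map_if_eq_sum_filter, sum_count_set, sum_count_set]
  simp

-- ===== VERDICT (by name: the statement is the Claim_ definition above) =====
theorem oconnor_score_spec : Claim_equal_oconnor_score := by
  intro tweet sentiment_dict _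
  unfold Spec_oconnor_score oconnor_score oconnor_score_alt
  simp only [PySem.Dict.foldl_insert_getD_add_one_eq_counter, A_loop, B_loop]
  have h := countP_split (((PySem.Str.split? (PySem.Str.lower tweet) " ").getD []))
    (fun w => (PySem.Dict.mk sentiment_dict).contains w)
    (fun w => decide ((PySem.Dict.mk sentiment_dict).getD w 0 < 0))
  simp only [Prod.mk.injEq]
  constructor
  · omega
  · trivial
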